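-- pv_equiv track=rewrite | github.com/vanshika-s/MetaEncode | src/ui/vocabularies.py | normalize_search_term
-- ===== SOURCE A (Python) =====
-- def normalize_search_term(term: str, alias_dict: dict[str, list[str]]) -> str | None:
--     """Normalize a search term using alias mappings.
--
--     Args:
--         term: User input search term.
--         alias_dict: Dictionary mapping canonical terms to aliases.
--
--     Returns:
--         Canonical term if found in aliases, None otherwise.
--     """
--     term_lower = term.lower().strip()
--     for canonical, aliases in alias_dict.items():
--         if term_lower == canonical.lower() or term_lower in [
--             a.lower() for a in aliases
--         ]:
--             return canonical
--     return None
-- ===== SOURCE B (Python) =====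
-- def normalize_search_term(term: str, alias_dict: dict[str, list[str]]) -> str | None:
--     """Build a flat lower-cased lookup table once (first occurrence wins),
--     then answer with a single dict lookup."""
--     index = {}
--     for canonical, aliases in alias_dict.items():
--         index.setdefault(canonical.lower(), canonical)
--         for a in aliases:
--             index.setdefault(a.lower(), canonical)
--     return index.get(term.lower().strip())
-- ===== Notes on version B (the rewrite author's own statement) =====
-- stated objective: alternative
-- what changed: Replaces the per-entry inline OR-check scan with a flattened lowercase->canonical index built once with first-occurrence-wins setdefault, followed by a single dict lookup.
import Mathlib
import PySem

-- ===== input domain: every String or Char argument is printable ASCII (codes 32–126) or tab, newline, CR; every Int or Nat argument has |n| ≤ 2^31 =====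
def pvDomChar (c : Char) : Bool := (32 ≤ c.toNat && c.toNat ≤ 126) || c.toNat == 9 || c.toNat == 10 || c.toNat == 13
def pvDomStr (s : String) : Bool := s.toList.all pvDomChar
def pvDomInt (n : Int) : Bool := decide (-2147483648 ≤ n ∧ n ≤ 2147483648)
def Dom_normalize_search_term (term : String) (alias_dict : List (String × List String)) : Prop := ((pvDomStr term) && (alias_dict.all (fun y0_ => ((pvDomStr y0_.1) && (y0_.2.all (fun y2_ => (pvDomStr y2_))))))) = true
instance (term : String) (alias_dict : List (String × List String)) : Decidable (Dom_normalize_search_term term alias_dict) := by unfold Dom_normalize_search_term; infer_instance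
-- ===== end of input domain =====

-- B replaces A's per-entry OR-check scan by a flattened lowercase→canonical index
-- (built first-occurrence-wins) plus a single lookup: alternative decomposition, same cost.

-- ===== PORT A =====
-- the for-loop with early return, entry by entry
def nstScanA (term_lower : String) : List (String × List String) → Option String
  | [] => none
  | (canonical, aliases) :: rest =>
    if term_lower == PySem.Str.lower canonical
        || (aliases.map (fun a => PySem.Str.lower a)).contains term_lower then
      some canonical
    else nstScanA term_lower rest

def normalize_search_term (term : String) (alias_dict : List (String × List String)) : Option String :=
  nstScanA (PySem.Str.strip (PySem.Str.lower term)) alias_dict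

-- ===== PORT B =====
-- build the index: for each entry, setdefault canonical.lower() then every a.lower()
def nstBuild (alias_dict : List (String × List String)) : PySem.Dict String String :=
  alias_dict.foldl
    (fun index p =>
      p.2.foldl (fun index a => index.setdefault (PySem.Str.lower a) p.1)
        (index.setdefault (PySem.Str.lower p.1) p.1))
    PySem.Dict.empty

def normalize_search_term_alt (term : String) (alias_dict : List (String × List String)) : Option String :=
  (nstBuild alias_dict).get? (PySem.Str.strip (PySem.Str.lower term))

-- ===== PRECONDITION & SPEC =====
def Spec_normalize_search_term (term : String) (alias_dict : List (String × List String)) (out : Option String) : Prop := out = normalize_search_term_alt term alias_dict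
instance (term : String) (alias_dict : List (String × List String)) (out : Option String) : Decidable (Spec_normalize_search_term term alias_dict out) := by unfold Spec_normalize_search_term; infer_instance

-- ===== CLAIM (what is proved, stated in full; the proofs are below) =====
def Claim_equal_normalize_search_term : Prop := ∀ (term : String) (alias_dict : List (String × List String)), Dom_normalize_search_term term alias_dict → Spec_normalize_search_term term alias_dict (normalize_search_term term alias_dict)

-- ===== LEMMAS AND PROOFS =====

-- one setdefault viewed through get?
theorem get?_setdefault' (d : PySem.Dict String String) (x c k : String) :
    (d.setdefault x c).get? k = (d.get? k).or (if k = x then some c else none) := by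
  by_cases h : k = x
  · subst h
    rw [PySem.Dict.get?_setdefault_self]
    cases d.get? k <;> simp
  · rw [PySem.Dict.get?_setdefault_of_ne d c h]
    simp [h]

-- a setdefault-fold over a list of keys, all mapping to the same canonical
theorem get?_setdefault_fold (keys : List String) (c : String)
    (d : PySem.Dict String String) (k : String) :
    (keys.foldl (fun d x => d.setdefault x c) d).get? k
      = (d.get? k).or (if keys.contains k then some c else none) := by
  induction keys generalizing d with
  | nil => simp
  | cons x rest ih =>
    simp only [List.foldl_cons, ih, get?_setdefault' d x c k, List.contains_cons]
    by_cases h : k = x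
    · subst h; cases d.get? k <;> simp
    · have : (x == k) = false := by simp [Ne.symm h]
      simp [h]

-- the whole build, relative to an arbitrary accumulator, equals A's scan after d
theorem get?_build_fold (l : List (String × List String))
    (d : PySem.Dict String String) (k : String) :
    (l.foldl
        (fun index p =>
          p.2.foldl (fun index a => index.setdefault (PySem.Str.lower a) p.1)
            (index.setdefault (PySem.Str.lower p.1) p.1))
        d).get? k
      = (d.get? k).or (nstScanA k l) := by
  induction l generalizing d with
  | nil => simp [nstScanA]
  | cons p rest ih =>
    obtain ⟨c, as⟩ := p
    simp only [List.foldl_cons, ih]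
    have hfold :
        ((as.foldl (fun index a => index.setdefault (PySem.Str.lower a) c)
            (d.setdefault (PySem.Str.lower c) c))).get? k
          = (d.get? k).or
              (if k = PySem.Str.lower c
                  ∨ (as.map (fun a => PySem.Str.lower a)).contains k = true
               then some c else none) := by
      have h1 : as.foldl (fun index a => index.setdefault (PySem.Str.lower a) c)
            (d.setdefault (PySem.Str.lower c) c)
          = (as.map (fun a => PySem.Str.lower a)).foldl (fun d x => d.setdefault x c)
            (d.setdefault (PySem.Str.lower c) c) := by
        rw [List.foldl_map]
      rw [h1, get?_setdefault_fold, get?_setdefault' d (PySem.Str.lower c) c k]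
      by_cases h : k = PySem.Str.lower c
      · subst h; cases d.get? (PySem.Str.lower c) <;> simp
      · by_cases h2 : (as.map (fun a => PySem.Str.lower a)).contains k = true
          <;> simp [h]
    rw [hfold]
    by_cases h : k = PySem.Str.lower c
        ∨ (as.map (fun a => PySem.Str.lower a)).contains k = true
    · have hb : (k == PySem.Str.lower c
          || (as.map (fun a => PySem.Str.lower a)).contains k) = true := by
        simpa using h
      simp only [nstScanA, hb, if_pos h, if_true]
      cases d.get? k <;> simp
    · have hb : (k == PySem.Str.lower c
          || (as.map (fun a => PySem.Str.lower a)).contains k) = false := by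
        simpa using h
      simp only [nstScanA, hb, if_neg h, Bool.false_eq_true, if_false]
      cases d.get? k <;> simp

-- ===== VERDICT (by name: the statement is the Claim_ definition above) =====
theorem normalize_search_term_spec : Claim_equal_normalize_search_term := by
  intro term alias_dict _
  unfold Spec_normalize_search_term normalize_search_term normalize_search_term_alt nstBuild
  rw [get?_build_fold]
  simp
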